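-- pv_equiv track=rewrite | github.com/Silence-Rain/Algorithmic_Programming_Practice | Goldman Sachs/main.py | maxCommon
-- ===== SOURCE A (Python) =====
-- def maxCommon(s):
-- 	def indexGenerator(n):
-- 		start = n // 2
-- 		yield start
-- 		for i in range(1, start):
-- 			yield start + i
-- 			yield start - i
-- 		if n % 2:
-- 			yield n - 1
--
-- 	n, res = len(s), 0
-- 	for i in indexGenerator(n):
-- 		dic1, dic2, curMax = {}, {}, 0
-- 		for c in s[:i]:
-- 			dic1[c] = dic1[c] + 1 if c in dic1 else 1
-- 		for c in s[i:]:
-- 			dic2[c] = dic2[c] + 1 if c in dic2 else 1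
--
-- 		for k, v in dic1.items():
-- 			if k in dic2:
-- 				curMax += min(v, dic2[k])
--
-- 		res = max(curMax, res)
-- 		if i < res or n - i < res:
-- 			break
--
-- 	return res
-- ===== SOURCE B (Python) =====
-- def maxCommon(s):
--     # One incremental left-to-right pass: maintain left/right char counts and the
--     # current common count, updating it by +-1 as the split boundary moves.
--     right = {}
--     for c in s:
--         right[c] = right.get(c, 0) + 1
--     left = {}
--     common = 0
--     res = 0
--     for c in s[:-1]:
--         l0 = left.get(c, 0)
--         r0 = right.get(c, 0)
--         if l0 + 1 < r0:
--             common += 1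
--         elif l0 >= r0:
--             common -= 1
--         left[c] = l0 + 1
--         right[c] = r0 - 1
--         if common > res:
--             res = common
--     return res
-- ===== Notes on version B (the rewrite author's own statement) =====
-- stated objective: faster
-- what changed: Replaces the center-out scan that rebuilds both character-count dicts and their intersection from scratch at every split with a single left-to-right pass that maintains the left/right counts and updates the common count by +-1 as the boundary moves.
import Mathlib
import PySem

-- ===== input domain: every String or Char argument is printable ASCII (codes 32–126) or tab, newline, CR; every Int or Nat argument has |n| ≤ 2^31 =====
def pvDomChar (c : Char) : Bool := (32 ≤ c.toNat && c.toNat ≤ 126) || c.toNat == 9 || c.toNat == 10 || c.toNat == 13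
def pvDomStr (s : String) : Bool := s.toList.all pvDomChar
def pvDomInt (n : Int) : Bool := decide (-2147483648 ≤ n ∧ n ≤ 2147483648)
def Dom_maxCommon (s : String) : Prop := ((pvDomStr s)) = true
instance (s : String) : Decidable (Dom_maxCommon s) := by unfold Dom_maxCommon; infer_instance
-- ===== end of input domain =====

-- B replaces A's center-out per-split dict rebuilding with one incremental left-to-right pass.

-- ===== PORT A =====
-- dic[c] = dic[c] + 1 if c in dic else 1, folded over a list of chars
def pvCountA (l : List Char) : PySem.Dict Char Int :=
  l.foldl (fun d c => d.insert c (if d.contains c then d.getD c 0 + 1 else 1)) PySem.Dict.empty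

-- for k, v in dic1.items(): if k in dic2: curMax += min(v, dic2[k])
def pvCurMax (d1 d2 : PySem.Dict Char Int) : Int :=
  d1.items.foldl (fun acc kv => if d2.contains kv.1 then acc + min kv.2 (d2.getD kv.1 0) else acc) 0

-- indexGenerator(n), materialised (the generator shares no state with the consuming loop)
def pvIdxGen (n : Int) : List Int :=
  let start := PySem.Int.floordiv n 2
  [start] ++ (PySem.List.pyRange 1 start 1).flatMap (fun i => [start + i, start - i])
    ++ (if PySem.Int.mod n 2 ≠ 0 then [n - 1] else [])

-- the for-loop over the generator, with the early 'break'
def pvALoop (t : List Char) (n : Int) : List Int → Int → Int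
  | [], res => res
  | i :: rest, res =>
    let dic1 := pvCountA (PySem.List.slice t none (some i))
    let dic2 := pvCountA (PySem.List.slice t (some i) none)
    let curMax := pvCurMax dic1 dic2
    let res' := max curMax res
    if i < res' ∨ n - i < res' then res' else pvALoop t n rest res'

def maxCommon (s : String) : Int :=
  pvALoop s.toList (PySem.Str.len s) (pvIdxGen (PySem.Str.len s)) 0

-- ===== PORT B =====
-- for c in s[:-1]: update left/right counts, common by ±1, running best
def pvBLoop : List Char → PySem.Dict Char Int → PySem.Dict Char Int → Int → Int → Int
  | [], _, _, _, res => res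
  | c :: cs, left, right, common, res =>
    let l0 := left.getD c 0
    let r0 := right.getD c 0
    let common' := if l0 + 1 < r0 then common + 1 else if l0 ≥ r0 then common - 1 else common
    let res' := if common' > res then common' else res
    pvBLoop cs (left.insert c (l0 + 1)) (right.insert c (r0 - 1)) common' res'

def maxCommon_alt (s : String) : Int :=
  let right := s.toList.foldl (fun d c => d.insert c (d.getD c 0 + 1)) PySem.Dict.empty
  pvBLoop (PySem.List.slice s.toList none (some (-1))) PySem.Dict.empty right 0 0

-- ===== PRECONDITION & SPEC =====
def Spec_maxCommon (s : String) (out : Int) : Prop := out = maxCommon_alt s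
instance (s : String) (out : Int) : Decidable (Spec_maxCommon s out) := by unfold Spec_maxCommon; infer_instance

-- ===== CLAIM (what is proved, stated in full; the proofs are below) =====
def Claim_equal_maxCommon : Prop := ∀ (s : String), Dom_maxCommon s → Spec_maxCommon s (maxCommon s)

-- ===== LEMMAS AND PROOFS =====

-- number of characters common to the two halves of the split of t at position i
def ccN (t : List Char) (i : Nat) : Nat :=
  ∑ c ∈ t.toFinset, min ((t.take i).count c) ((t.drop i).count c)

-- the maximum of ccN over all proper splits
def supCC (t : List Char) : Nat := (Finset.Ico 1 t.length).sup (ccN t)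

-- the potential of split index i: an upper bound for ccN, decreasing along A's scan order
def potI (n i : Int) : Int := min i (n - i)

lemma pvCountA_eq_counter (l : List Char) : pvCountA l = PySem.Dict.counter l := by
  rw [← PySem.Dict.foldl_insert_getD_add_one_eq_counter]
  unfold pvCountA
  have h : (fun (d : PySem.Dict Char Int) c => d.insert c (if d.contains c then d.getD c 0 + 1 else 1))
      = fun d c => d.insert c (d.getD c 0 + 1) := by
    funext d c
    by_cases h : d.contains c
    · simp [h]
    · simp [h, PySem.Dict.getD_of_not_contains (h := by simpa using h)]
  rw [h]

lemma curMax_eq (u v : List Char) :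
    pvCurMax (pvCountA u) (pvCountA v)
      = ∑ c ∈ u.toFinset, min ((u.count c : Int)) ((v.count c : Int)) := by
  unfold pvCurMax
  rw [pvCountA_eq_counter, pvCountA_eq_counter, PySem.Dict.items_counter, List.foldl_map]
  rw [PySem.List.foldl_congr_mem (PySem.Set.ofList u) _
      (fun acc c => acc + min ((u.count c : Int)) ((v.count c : Int))) 0 ?_]
  · rw [PySem.List.foldl_add]
    rw [← List.sum_toFinset _ (PySem.Set.nodup_ofList u), zero_add]
    apply Finset.sum_congr
    · apply Finset.ext; intro x; simp [PySem.Set.mem_ofList]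
    · intro x _; rfl
  · intro acc c _
    by_cases h : (PySem.Dict.counter v).contains c
    · simp only [h, if_true, PySem.Dict.getD_counter]
    · have hcv : v.count c = 0 := by
        rw [PySem.Dict.contains_counter] at h
        simp only [List.contains_eq_mem, Bool.not_eq_true, decide_eq_false_iff_not] at h
        exact List.count_eq_zero.mpr h
      simp only [h, hcv]
      simp

lemma ccN_eq_curMax (t : List Char) (i : Nat) :
    pvCurMax (pvCountA (t.take i)) (pvCountA (t.drop i)) = (ccN t i : Int) := by
  rw [curMax_eq (t.take i) (t.drop i)]
  unfold ccN
  push_cast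
  refine Finset.sum_subset ?_ ?_
  · intro c hc
    simp only [List.mem_toFinset] at hc ⊢
    exact List.mem_of_mem_take hc
  · intro c _ hc
    simp only [List.mem_toFinset] at hc
    rw [List.count_eq_zero.mpr hc]
    simp

lemma ccN_zero (t : List Char) : ccN t 0 = 0 := by
  simp [ccN]

lemma ccN_len (t : List Char) : ccN t t.length = 0 := by
  simp [ccN]

lemma ccN_le (t : List Char) (i : Nat) :
    ccN t i ≤ min i (t.length - i) := by
  unfold ccN
  refine le_min ?_ ?_
  · calc (∑ c ∈ t.toFinset, min ((t.take i).count c) ((t.drop i).count c))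
        ≤ ∑ c ∈ t.toFinset, (t.take i).count c :=
          Finset.sum_le_sum fun c _ => Nat.min_le_left _ _
      _ = ∑ c ∈ (t.take i).toFinset, (t.take i).count c := by
          refine (Finset.sum_subset ?_ ?_).symm
          · intro c hc
            simp only [List.mem_toFinset] at hc ⊢
            exact List.mem_of_mem_take hc
          · intro c _ hc
            simp only [List.mem_toFinset] at hc
            exact List.count_eq_zero.mpr hc
      _ = (t.take i).length := List.sum_toFinset_count_eq_length _
      _ ≤ i := by simp
  · calc (∑ c ∈ t.toFinset, min ((t.take i).count c) ((t.drop i).count c))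
        ≤ ∑ c ∈ t.toFinset, (t.drop i).count c :=
          Finset.sum_le_sum fun c _ => Nat.min_le_right _ _
      _ = ∑ c ∈ (t.drop i).toFinset, (t.drop i).count c := by
          refine (Finset.sum_subset ?_ ?_).symm
          · intro c hc
            simp only [List.mem_toFinset] at hc ⊢
            exact List.mem_of_mem_drop hc
          · intro c _ hc
            simp only [List.mem_toFinset] at hc
            exact List.count_eq_zero.mpr hc
      _ = (t.drop i).length := List.sum_toFinset_count_eq_length _
      _ ≤ t.length - i := by simp

lemma foldl_max_const (g : Int → Int) (l : List Int) (a : Int) (h : ∀ x ∈ l, g x ≤ a) :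
    l.foldl (fun acc x => max acc (g x)) a = a := by
  induction l with
  | nil => rfl
  | cons x l ih =>
    rw [List.foldl_cons, max_eq_left (h x (by simp))]
    exact ih fun y hy => h y (by simp [hy])

lemma ccN_le_potI (t : List Char) (j : Int) (h0 : 0 ≤ j) (h1 : j ≤ (t.length : Int)) :
    (ccN t j.toNat : Int) ≤ potI (t.length : Int) j := by
  have h := ccN_le t j.toNat
  unfold potI
  omega

lemma aLoop_eq_foldl (t : List Char) (zs : List Int)
    (hmem : ∀ i ∈ zs, 0 ≤ i ∧ i ≤ (t.length : Int))
    (hpair : zs.Pairwise (fun a b => potI (t.length : Int) b ≤ potI (t.length : Int) a)) :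
    ∀ res, pvALoop t (t.length : Int) zs res
      = zs.foldl (fun acc i => max acc ((ccN t i.toNat : Int))) res := by
  induction zs with
  | nil => intro res; rfl
  | cons i rest ih =>
    intro res
    have hi := hmem i (by simp)
    have hrest : ∀ j ∈ rest, 0 ≤ j ∧ j ≤ (t.length : Int) := fun j hj => hmem j (by simp [hj])
    obtain ⟨hhead, hpair'⟩ := List.pairwise_cons.mp hpair
    simp only [pvALoop]
    rw [PySem.List.slice_to _ hi.1, PySem.List.slice_from _ hi.1, ccN_eq_curMax,
      List.foldl_cons]
    by_cases hbr : i < max ((ccN t i.toNat : Int)) res ∨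
        (t.length : Int) - i < max ((ccN t i.toNat : Int)) res
    · rw [if_pos hbr]
      rw [foldl_max_const _ rest _ ?_]
      · exact max_comm _ _
      · intro j hj
        have hb := ccN_le_potI t j (hrest j hj).1 (hrest j hj).2
        have hp := hhead j hj
        have hlt : potI (t.length : Int) i < max ((ccN t i.toNat : Int)) res := by
          have hb2 := ccN_le_potI t i hi.1 hi.2
          unfold potI at hb2 ⊢
          omega
        omega
    · rw [if_neg hbr, ih hrest hpair', max_comm]

lemma foldl_max_int_eq_natCast (zs : List Int) (g : Int → Nat) (a : Nat) :
    zs.foldl (fun acc i => max acc ((g i : Int))) (a : Int)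
      = ((zs.foldl (fun acc i => max acc (g i)) a : Nat) : Int) := by
  induction zs generalizing a with
  | nil => rfl
  | cons x l ih =>
    rw [List.foldl_cons, List.foldl_cons, ← Nat.cast_max, ih]

lemma foldl_max_nat_le (zs : List Int) (g : Int → Nat) (a c : Nat) (ha : a ≤ c)
    (h : ∀ i ∈ zs, g i ≤ c) : zs.foldl (fun acc i => max acc (g i)) a ≤ c := by
  induction zs generalizing a with
  | nil => exact ha
  | cons x l ih =>
    rw [List.foldl_cons]
    exact ih _ (max_le ha (h x (by simp))) fun y hy => h y (by simp [hy])

lemma mem_zig_iff (n : Int) (hn : 2 ≤ n) (j : Int) : j ∈ pvIdxGen n ↔ 1 ≤ j ∧ j < n := by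
  unfold pvIdxGen
  simp only [PySem.Int.floordiv_eq_ediv_of_pos (by norm_num : (0:Int) < 2),
    PySem.Int.mod_eq_emod_of_pos (by norm_num : (0:Int) < 2)]
  by_cases hp : n % 2 = 0
  · simp [hp, PySem.List.mem_pyRange_one]
    constructor
    · rintro (rfl | ⟨a, ⟨h1, h2⟩, (rfl | rfl)⟩) <;> omega
    · intro ⟨hj1, hjn⟩
      rcases lt_trichotomy j (n / 2) with h | h | h
      · exact Or.inr ⟨n / 2 - j, ⟨by omega, by omega⟩, Or.inr (by omega)⟩
      · exact Or.inl (by omega)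
      · exact Or.inr ⟨j - n / 2, ⟨by omega, by omega⟩, Or.inl (by omega)⟩
  · simp [hp, PySem.List.mem_pyRange_one]
    constructor
    · rintro (rfl | ⟨a, ⟨h1, h2⟩, (rfl | rfl)⟩ | rfl) <;> omega
    · intro ⟨hj1, hjn⟩
      by_cases hlast : j = n - 1
      · exact Or.inr (Or.inr hlast)
      rcases lt_trichotomy j (n / 2) with h | h | h
      · exact Or.inr (Or.inl ⟨n / 2 - j, ⟨by omega, by omega⟩, Or.inr (by omega)⟩)
      · exact Or.inl (by omega)
      · exact Or.inr (Or.inl ⟨j - n / 2, ⟨by omega, by omega⟩, Or.inl (by omega)⟩)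

lemma flat_aux (n : Int) (m : Nat) : ∀ i : Int, 1 ≤ i → (n / 2 - i).toNat ≤ m →
    ((PySem.List.pyRange i (n / 2) 1).flatMap (fun k => [n / 2 + k, n / 2 - k])).Pairwise
        (fun a b => potI n b ≤ potI n a)
      ∧ ∀ j ∈ (PySem.List.pyRange i (n / 2) 1).flatMap (fun k => [n / 2 + k, n / 2 - k]),
          1 ≤ potI n j ∧ potI n j ≤ n / 2 - i + 1 := by
  induction m with
  | zero =>
    intro i h1 hm
    rw [PySem.List.pyRange_one_eq_nil (by omega)]
    simp
  | succ m ih =>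
    intro i h1 hm
    by_cases hlt : i < n / 2
    · rw [PySem.List.pyRange_one_cons hlt]
      simp only [List.flatMap_cons, List.cons_append, List.nil_append]
      obtain ⟨ihp, ihb⟩ := ih (i + 1) (by omega) (by omega)
      refine ⟨List.Pairwise.cons ?_ (List.Pairwise.cons ?_ ihp), ?_⟩
      · intro b hb
        rcases List.mem_cons.mp hb with rfl | hb
        · unfold potI; omega
        · have := ihb b hb; unfold potI at this ⊢; omega
      · intro b hb
        have := ihb b hb; unfold potI at this ⊢; omega
      · intro j hj
        rcases List.mem_cons.mp hj with rfl | hj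
        · unfold potI; omega
        rcases List.mem_cons.mp hj with rfl | hj
        · unfold potI; omega
        · have := ihb j hj; unfold potI at this ⊢; omega
    · rw [PySem.List.pyRange_one_eq_nil (by omega)]
      simp


lemma zig_pairwise (n : Int) (hn : 0 ≤ n) :
    (pvIdxGen n).Pairwise (fun a b => potI n b ≤ potI n a) := by
  unfold pvIdxGen
  simp only [PySem.Int.floordiv_eq_ediv_of_pos (by norm_num : (0:Int) < 2),
    PySem.Int.mod_eq_emod_of_pos (by norm_num : (0:Int) < 2)]
  obtain ⟨hflatp, hflatb⟩ := flat_aux n (n / 2 - 1).toNat 1 (by norm_num) (by omega)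
  rw [List.singleton_append]
  refine List.Pairwise.cons ?_ ?_
  · intro b hb
    rcases List.mem_append.mp hb with hb | hb
    · have := hflatb b hb; unfold potI at this ⊢; omega
    · by_cases hp : n % 2 = 0
      · simp [hp] at hb
      · simp [hp] at hb; subst hb; unfold potI; omega
  · refine List.pairwise_append.mpr ⟨hflatp, ?_, ?_⟩
    · by_cases hp : n % 2 = 0 <;> simp [hp]
    · intro a ha b hb
      by_cases hp : n % 2 = 0
      · simp [hp] at hb
      · simp [hp] at hb; subst hb
        have := hflatb a ha; unfold potI at this ⊢; omega

lemma zig_mem_bounds (n : Int) (hn : 0 ≤ n) : ∀ i ∈ pvIdxGen n, 0 ≤ i ∧ i ≤ n := by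
  intro j hj
  unfold pvIdxGen at hj
  simp only [PySem.Int.floordiv_eq_ediv_of_pos (by norm_num : (0:Int) < 2),
    PySem.Int.mod_eq_emod_of_pos (by norm_num : (0:Int) < 2)] at hj
  by_cases hp : n % 2 = 0 <;> simp [hp, PySem.List.mem_pyRange_one] at hj
  · rcases hj with rfl | ⟨a, ⟨h1, h2⟩, rfl | rfl⟩ <;> omega
  · rcases hj with rfl | ⟨a, ⟨h1, h2⟩, rfl | rfl⟩ | rfl <;> omega

lemma fold_zig_eq_sup (t : List Char) :
    (pvIdxGen (t.length : Int)).foldl (fun acc i => max acc (ccN t i.toNat)) 0 = supCC t := by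
  by_cases h2 : 2 ≤ t.length
  · have h2' : (2 : Int) ≤ (t.length : Int) := by exact_mod_cast h2
    apply le_antisymm
    · apply foldl_max_nat_le _ _ _ _ (Nat.zero_le _)
      intro i hi
      have hm := (mem_zig_iff _ h2' i).mp hi
      exact Finset.le_sup (f := ccN t) (by simp only [Finset.mem_Ico]; omega)
    · unfold supCC
      apply Finset.sup_le
      intro k hk
      simp only [Finset.mem_Ico] at hk
      have hmem : ((k : Int)) ∈ pvIdxGen ((t.length : Int)) :=
        (mem_zig_iff _ h2' (k : Int)).mpr (by omega)
      have h := (PySem.List.le_foldl_max_nat (pvIdxGen ((t.length : Int)))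
        (fun i => ccN t i.toNat) 0).2 _ hmem
      simpa using h
  · have hsup : supCC t = 0 := by
      unfold supCC
      rw [Finset.Ico_eq_empty (by omega)]
      rfl
    rw [hsup]
    apply Nat.le_antisymm _ (Nat.zero_le _)
    apply foldl_max_nat_le _ _ _ _ (Nat.le_refl 0)
    intro i hi
    have hb := zig_mem_bounds ((t.length : Int)) (by positivity) i hi
    have : i.toNat = 0 ∨ i.toNat = t.length := by omega
    rcases this with h | h
    · rw [h, ccN_zero]
    · rw [h, ccN_len]

lemma maxCommon_eq_sup (s : String) : maxCommon s = ((supCC s.toList : Nat) : Int) := by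
  unfold maxCommon
  rw [PySem.Str.len_eq]
  rw [aLoop_eq_foldl _ _ (zig_mem_bounds _ (by positivity)) (zig_pairwise _ (by positivity))]
  rw [show ((0 : Int)) = (((0 : Nat) : Int)) from rfl, foldl_max_int_eq_natCast,
    fold_zig_eq_sup]

lemma count_take_succ (t : List Char) (i : Nat) (hi : i < t.length) (x : Char) :
    (t.take (i + 1)).count x = (t.take i).count x + if t[i] = x then 1 else 0 := by
  rw [List.take_add_one, List.getElem?_eq_getElem hi, Option.toList_some, List.count_append]
  simp [List.count_cons]

lemma count_drop_succ (t : List Char) (i : Nat) (hi : i < t.length) (x : Char) :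
    (t.drop i).count x = (t.drop (i + 1)).count x + if t[i] = x then 1 else 0 := by
  rw [List.drop_eq_getElem_cons hi, List.count_cons]
  simp

lemma ccN_step (t : List Char) (i : Nat) (hi : i < t.length) :
    ccN t (i + 1) + min ((t.take i).count t[i]) ((t.drop i).count t[i])
      = ccN t i + min ((t.take i).count t[i] + 1) ((t.drop i).count t[i] - 1) := by
  unfold ccN
  have hc : t[i] ∈ t.toFinset := List.mem_toFinset.mpr (List.getElem_mem hi)
  rw [← Finset.add_sum_erase _ _ hc, ← Finset.add_sum_erase _ _ hc]
  have hsum : (∑ x ∈ t.toFinset.erase t[i], min ((t.take (i+1)).count x) ((t.drop (i+1)).count x))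
      = ∑ x ∈ t.toFinset.erase t[i], min ((t.take i).count x) ((t.drop i).count x) := by
    refine Finset.sum_congr rfl fun x hx => ?_
    have hne : t[i] ≠ x := fun h => (Finset.mem_erase.mp hx).1 h.symm
    rw [count_take_succ t i hi x, count_drop_succ t i hi x, if_neg hne]
    simp
  rw [hsum]
  have h1 : (t.take (i+1)).count t[i] = (t.take i).count t[i] + 1 := by
    rw [count_take_succ t i hi, if_pos rfl]
  have h2 : (t.drop i).count t[i] = (t.drop (i+1)).count t[i] + 1 := by
    rw [count_drop_succ t i hi, if_pos rfl]
  omega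

lemma bLoop_spec (t : List Char) : ∀ (r : List Char) (i : Nat)
    (left right : PySem.Dict Char Int) (common res : Int),
    i + r.length + 1 = t.length →
    r = (t.take (t.length - 1)).drop i →
    (∀ x, left.getD x 0 = ((t.take i).count x : Int)) →
    (∀ x, right.getD x 0 = ((t.drop i).count x : Int)) →
    common = (ccN t i : Int) →
    res = (((Finset.Ico 1 (i + 1)).sup (ccN t) : Nat) : Int) →
    pvBLoop r left right common res = ((supCC t : Nat) : Int) := by
  intro r
  induction r with
  | nil =>
    intro i left right common res hlen hr hl hrt hcom hres
    have h1 : i + 1 = t.length := by simpa using hlen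
    rw [pvBLoop, hres]
    unfold supCC
    rw [h1]
  | cons c cs ih =>
    intro i left right common res hlen hr hl hrt hcom hres
    have hlen' : (i + 1) + cs.length + 1 = t.length := by
      simp only [List.length_cons] at hlen; omega
    have hi1 : i < t.length - 1 := by simp only [List.length_cons] at hlen; omega
    have hi : i < t.length := by omega
    have hc : t[i] = c := by
      have h0 : ((t.take (t.length - 1)).drop i)[0]? = some c := by rw [← hr]; rfl
      rw [List.getElem?_drop, Nat.add_zero, List.getElem?_take_of_lt hi1,
        List.getElem?_eq_getElem hi] at h0
      exact (Option.some_injective _ h0)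
    have hcs : cs = (t.take (t.length - 1)).drop (i + 1) := by
      have := congrArg List.tail hr
      simpa [List.tail_drop] using this
    have hr1 : 1 ≤ (t.drop i).count c := by
      rw [List.drop_eq_getElem_cons hi, hc]
      simp
    have hstep := ccN_step t i hi
    rw [hc] at hstep
    simp only [pvBLoop]
    rw [hl c, hrt c]
    apply ih (i + 1) _ _ _ _ hlen' hcs
    · intro x
      rw [PySem.Dict.getD_insert, count_take_succ t i hi x, hc]
      by_cases hx : x = c
      · rw [if_pos hx, if_pos hx.symm]
        subst hx; push_cast; ring
      · rw [if_neg hx, if_neg (fun h => hx h.symm), hl x]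
        push_cast; ring
    · intro x
      rw [PySem.Dict.getD_insert]
      by_cases hx : x = c
      · rw [if_pos hx]
        subst hx
        have h3 := count_drop_succ t i hi x
        rw [hc, if_pos rfl] at h3
        omega
      · rw [if_neg hx, hrt x]
        have h3 := count_drop_succ t i hi x
        rw [hc, if_neg (fun h => hx h.symm)] at h3
        omega
    · rw [hcom]
      split_ifs with h1 h2 <;> omega
    · rw [hres]
      rw [Nat.Ico_succ_right_eq_insert_Ico (by omega : 1 ≤ i + 1), Finset.sup_insert]
      have hmax : ccN t (i + 1) ⊔ (Finset.Ico 1 (i + 1)).sup (ccN t)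
          = max (ccN t (i + 1)) ((Finset.Ico 1 (i + 1)).sup (ccN t)) := rfl
      rw [hmax]
      split_ifs with h1 h2 h3 h4 h5 <;> push_cast <;> omega

lemma maxCommonAlt_eq_sup (s : String) : maxCommon_alt s = ((supCC s.toList : Nat) : Int) := by
  unfold maxCommon_alt
  by_cases h0 : s.toList = []
  · rw [h0]
    simp [pvBLoop, supCC, PySem.List.slice]
  · have hlen : 1 ≤ s.toList.length := List.length_pos_iff.mpr h0
    rw [PySem.List.slice_to_neg_one, List.dropLast_eq_take,
      PySem.Dict.foldl_insert_getD_add_one_eq_counter]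
    apply bLoop_spec s.toList _ 0
    · simp only [List.length_take, Nat.zero_add]; omega
    · simp
    · intro x; simp
    · intro x; simp [PySem.Dict.getD_counter]
    · simp [ccN_zero]
    · simp

-- ===== VERDICT (by name: the statement is the Claim_ definition above) =====
theorem maxCommon_spec : Claim_equal_maxCommon := by
  intro s _
  unfold Spec_maxCommon
  rw [maxCommon_eq_sup, maxCommonAlt_eq_sup]
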